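-- pv_equiv track=rewrite | github.com/PedroJuanSoto/Diagonal-Test | new_gen_construct.py | create_N_zig_zag_new_style
-- ===== SOURCE A (Python) =====
-- def create_N_zig_zag_new_style(n):
-- 	N = []
-- 	if n % 2 == 0:
-- 		for i in range(n//2):
-- 			N.append(n - i)
-- 			N.append(1 + i)
-- 	else:
-- 		for i in range(n//2):
-- 			N.append(n - i)
-- 			N.append(1 + i)
-- 		N.append(n//2+1)
-- 	return N
-- ===== SOURCE B (Python) =====
-- def create_N_zig_zag_new_style(n):
--     return [n - j//2 if j % 2 == 0 else (j+1)//2 for j in range(n)]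
-- ===== Notes on version B (the rewrite author's own statement) =====
-- stated objective: simpler
-- what changed: B computes each output element independently by a closed formula on its index j (n - j//2 for even j, (j+1)//2 for odd j) in one comprehension over range(n), removing A's even/odd-n branch and its incremental pairwise double-append.
-- intended difference: For negative odd n, A's else-branch still appends the middle element and returns [n//2+1] (e.g. [0] for n=-1), while B returns the empty list, the intended zig-zag of nonpositive length. — e.g. on create_N_zig_zag_new_style(-1): A returns [0], B returns []
import Mathlib
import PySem

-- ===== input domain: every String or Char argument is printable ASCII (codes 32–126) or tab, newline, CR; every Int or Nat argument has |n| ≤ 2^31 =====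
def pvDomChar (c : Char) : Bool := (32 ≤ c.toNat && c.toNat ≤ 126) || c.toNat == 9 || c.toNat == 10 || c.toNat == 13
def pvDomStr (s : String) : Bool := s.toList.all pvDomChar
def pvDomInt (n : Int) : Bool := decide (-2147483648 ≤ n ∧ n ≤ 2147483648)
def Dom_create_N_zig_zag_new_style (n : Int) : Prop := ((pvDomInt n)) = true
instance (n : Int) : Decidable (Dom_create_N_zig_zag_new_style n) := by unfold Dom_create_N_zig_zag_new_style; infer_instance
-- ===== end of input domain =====

-- B replaces A's even/odd-n branch and incremental pairwise double-append with one pass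
-- computing each element by a closed formula on its index (objective: simpler).

-- ===== PORT A =====
def create_N_zig_zag_new_style (n : Int) : List Int :=
  if PySem.Int.mod n 2 = 0 then
    (PySem.List.pyRange 0 (PySem.Int.floordiv n 2) 1).foldl
      (fun N i => (N ++ [n - i]) ++ [1 + i]) []
  else
    ((PySem.List.pyRange 0 (PySem.Int.floordiv n 2) 1).foldl
      (fun N i => (N ++ [n - i]) ++ [1 + i]) []) ++ [PySem.Int.floordiv n 2 + 1]

-- ===== PORT B =====
def create_N_zig_zag_new_style_alt (n : Int) : List Int :=
  (PySem.List.pyRange 0 n 1).map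
    (fun j => if PySem.Int.mod j 2 = 0 then n - PySem.Int.floordiv j 2
              else PySem.Int.floordiv (j + 1) 2)

-- ===== PRECONDITION & SPEC =====
-- For negative odd n, A's else-branch still appends the middle element and returns [n//2+1]
-- (e.g. [0] for n = -1), while B returns [], the intended zig-zag of nonpositive length.
def D_create_N_zig_zag_new_style (n : Int) : Prop := n < 0 ∧ PySem.Int.mod n 2 = 1
instance (n : Int) : Decidable (D_create_N_zig_zag_new_style n) := by unfold D_create_N_zig_zag_new_style; infer_instance
def Spec_create_N_zig_zag_new_style (n : Int) (out : List Int) : Prop := ¬ D_create_N_zig_zag_new_style n → out = create_N_zig_zag_new_style_alt n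
instance (n : Int) (out : List Int) : Decidable (Spec_create_N_zig_zag_new_style n out) := by unfold Spec_create_N_zig_zag_new_style; infer_instance
def pvDiffWitness_create_N_zig_zag_new_style : Int := (-1)
def pvDiffWitnessOut_create_N_zig_zag_new_style : (List Int) × (List Int) := ([0], [])

-- ===== CLAIM (what is proved, stated in full; the proofs are below) =====
def Claim_unchanged_create_N_zig_zag_new_style : Prop := ∀ (n : Int), Dom_create_N_zig_zag_new_style n → Spec_create_N_zig_zag_new_style n (create_N_zig_zag_new_style n)
def Claim_changed_create_N_zig_zag_new_style : Prop := Dom_create_N_zig_zag_new_style (pvDiffWitness_create_N_zig_zag_new_style) ∧ D_create_N_zig_zag_new_style (pvDiffWitness_create_N_zig_zag_new_style) ∧ create_N_zig_zag_new_style (pvDiffWitness_create_N_zig_zag_new_style) = pvDiffWitnessOut_create_N_zig_zag_new_style.1 ∧ create_N_zig_zag_new_style_alt (pvDiffWitness_create_N_zig_zag_new_style) = pvDiffWitnessOut_create_N_zig_zag_new_style.2 ∧ pvDiffWitnessOut_create_N_zig_zag_new_style.1 ≠ pvDiffWitnessOut_create_N_zig_zag_new_style.2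
def Claim_exact_create_N_zig_zag_new_style : Prop := ∀ (n : Int), Dom_create_N_zig_zag_new_style n → D_create_N_zig_zag_new_style n → create_N_zig_zag_new_style n ≠ create_N_zig_zag_new_style_alt n

-- ===== LEMMAS AND PROOFS =====

-- B's element formula, instantiated at even and odd indices.
theorem pvB_even (n : Int) (i : Int) :
    (if PySem.Int.mod (2*i) 2 = 0 then n - PySem.Int.floordiv (2*i) 2
     else PySem.Int.floordiv (2*i + 1) 2) = n - i := by
  have h0 : PySem.Int.mod (2*i) 2 = 0 := by
    rw [PySem.Int.mod_eq_emod_of_pos (by omega : (0:Int) < 2)]; omega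
  rw [if_pos h0, PySem.Int.floordiv_eq_ediv_of_pos (by omega : (0:Int) < 2)]; omega

theorem pvB_odd (n : Int) (i : Int) :
    (if PySem.Int.mod (2*i + 1) 2 = 0 then n - PySem.Int.floordiv (2*i + 1) 2
     else PySem.Int.floordiv (2*i + 1 + 1) 2) = 1 + i := by
  have h1 : PySem.Int.mod (2*i + 1) 2 = 1 := by
    rw [PySem.Int.mod_eq_emod_of_pos (by omega : (0:Int) < 2)]; omega
  rw [if_neg (by omega), PySem.Int.floordiv_eq_ediv_of_pos (by omega : (0:Int) < 2)]; omega

-- core: map of B's formula over range(2m) equals A's pairwise fold over range(m)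
theorem pvCore (n : Int) (m : Nat) :
    (PySem.List.pyRange 0 (2*(m:Int)) 1).map
      (fun j => if PySem.Int.mod j 2 = 0 then n - PySem.Int.floordiv j 2
                else PySem.Int.floordiv (j + 1) 2)
    = (PySem.List.pyRange 0 (m:Int) 1).foldl (fun N i => (N ++ [n - i]) ++ [1 + i]) [] := by
  induction m with
  | zero => simp [PySem.List.pyRange_one_eq_nil (by omega : (0:Int) ≤ 0)]
  | succ k ih =>
    have hk : (0 : Int) ≤ (k : Int) := Int.natCast_nonneg k
    have h1 : PySem.List.pyRange 0 (2*((k:Int)+1)) 1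
        = PySem.List.pyRange 0 (2*(k:Int)) 1 ++ [2*(k:Int), 2*(k:Int)+1] := by
      rw [show (2*((k:Int)+1)) = (2*(k:Int)+1)+1 by ring,
          PySem.List.pyRange_one_succ_right (by omega : (0:Int) ≤ 2*(k:Int)+1),
          PySem.List.pyRange_one_succ_right (by omega : (0:Int) ≤ 2*(k:Int))]
      simp
    rw [show ((k+1 : Nat) : Int) = (k:Int)+1 by push_cast; ring, h1,
        PySem.List.pyRange_one_succ_right hk, List.map_append, List.foldl_append, ih]
    simp only [List.map_cons, List.map_nil, List.foldl_cons, List.foldl_nil]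
    rw [pvB_even n k, pvB_odd n k]
    simp

-- ===== VERDICT (by name: the statement is the Claim_ definition above) =====
theorem create_N_zig_zag_new_style_spec : Claim_unchanged_create_N_zig_zag_new_style := by
  intro n _ hD
  have hmod := PySem.Int.floordiv_mul_add_mod n 2
  have hemod := PySem.Int.mod_eq_emod_of_pos (a := n) (by omega : (0:Int) < 2)
  show create_N_zig_zag_new_style n = create_N_zig_zag_new_style_alt n
  unfold create_N_zig_zag_new_style create_N_zig_zag_new_style_alt
  by_cases he : PySem.Int.mod n 2 = 0
  · rw [if_pos he]
    by_cases hn : 0 ≤ n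
    · obtain ⟨m, hm⟩ : ∃ m : Nat, PySem.Int.floordiv n 2 = (m : Int) :=
        ⟨(PySem.Int.floordiv n 2).toNat, by
          rw [PySem.Int.floordiv_eq_ediv_of_pos (by omega : (0:Int) < 2)]; omega⟩
      rw [hm, show n = 2*(m:Int) by omega]
      exact (pvCore (2*(m:Int)) m).symm
    · rw [PySem.List.pyRange_one_eq_nil (by
          rw [PySem.Int.floordiv_eq_ediv_of_pos (by omega : (0:Int) < 2)]; omega),
        PySem.List.pyRange_one_eq_nil (by omega : n ≤ 0)]
      simp
  · rw [if_neg he]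
    have hm1 : PySem.Int.mod n 2 = 1 := by omega
    have hn : 0 ≤ n := by
      by_contra h
      exact hD ⟨by omega, hm1⟩
    obtain ⟨m, hm⟩ : ∃ m : Nat, PySem.Int.floordiv n 2 = (m : Int) :=
      ⟨(PySem.Int.floordiv n 2).toNat, by
        rw [PySem.Int.floordiv_eq_ediv_of_pos (by omega : (0:Int) < 2)]; omega⟩
    have hk : (0 : Int) ≤ (m : Int) := Int.natCast_nonneg m
    rw [hm, show n = 2*(m:Int)+1 by omega,
      PySem.List.pyRange_one_succ_right (by omega : (0:Int) ≤ 2*(m:Int)),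
      List.map_append, pvCore (2*(m:Int)+1) m]
    simp only [List.map_cons, List.map_nil]
    rw [pvB_even (2*(m:Int)+1) m]
    rw [show (2*(m:Int)+1) - (m:Int) = (m:Int) + 1 by omega]

theorem create_N_zig_zag_new_style_changed : Claim_changed_create_N_zig_zag_new_style := by
  unfold Claim_changed_create_N_zig_zag_new_style; decide

theorem create_N_zig_zag_new_style_tight : Claim_exact_create_N_zig_zag_new_style := by
  intro n _ hD
  obtain ⟨hneg, hm1⟩ := hD
  have hemod := PySem.Int.mod_eq_emod_of_pos (a := n) (by omega : (0:Int) < 2)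
  unfold create_N_zig_zag_new_style create_N_zig_zag_new_style_alt
  rw [if_neg (by omega : ¬ PySem.Int.mod n 2 = 0),
    PySem.List.pyRange_one_eq_nil (by
      rw [PySem.Int.floordiv_eq_ediv_of_pos (by omega : (0:Int) < 2)]; omega),
    PySem.List.pyRange_one_eq_nil (by omega : n ≤ 0)]
  simp
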